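-- pv_equiv track=rewrite | github.com/CarterT101/PythonChallenges | morepythonchallenges.py | distinguish_words
-- ===== SOURCE A (Python) =====
-- def distinguish_words(str):
--     str = str.split()
--     i = 0
--     for s in str:
--         if not s.isdigit():
--             i += 1
--         if s.isdigit():
--             i = 0
--         if i >= 3:
--             return True
--     return False
-- ===== SOURCE B (Python) =====
-- def distinguish_words(str):
--     flags = [w.isdigit() for w in str.split()]
--     return any(not (a or b or c) for a, b, c in zip(flags, flags[1:], flags[2:]))
-- ===== Notes on version B (the rewrite author's own statement) =====
-- stated objective: idiomatic
-- what changed: Replaces the running reset-on-digit counter with a precomputed digit-flag list and an any() over a sliding window of three flags built by zipping the list with its two shifts.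
import Mathlib
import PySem

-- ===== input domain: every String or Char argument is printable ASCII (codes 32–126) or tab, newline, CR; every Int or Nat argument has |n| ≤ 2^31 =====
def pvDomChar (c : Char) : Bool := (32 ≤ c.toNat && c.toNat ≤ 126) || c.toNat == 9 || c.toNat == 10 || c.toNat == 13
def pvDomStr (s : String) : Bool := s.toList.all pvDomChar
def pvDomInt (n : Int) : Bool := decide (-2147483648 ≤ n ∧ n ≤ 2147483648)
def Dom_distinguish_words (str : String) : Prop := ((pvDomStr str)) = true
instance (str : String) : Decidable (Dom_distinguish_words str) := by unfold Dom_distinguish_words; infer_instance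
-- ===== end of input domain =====

-- B replaces A's reset-on-digit running counter with an any() over a sliding window of
-- three digit-flags (zip of the flag list with its two shifts); same cost, more idiomatic.

-- ===== PORT A =====
-- the for-loop of A with its running counter i (reset on a digit word, early return at i >= 3)
def pvALoop : List String → Nat → Bool
  | [], _ => false
  | s :: rest, i =>
    let i1 := if !(PySem.Str.strIsdigit s) then i + 1 else i
    let i2 := if PySem.Str.strIsdigit s then 0 else i1
    if 3 ≤ i2 then true else pvALoop rest i2

def distinguish_words (str : String) : Bool :=
  pvALoop (PySem.Str.split₀ str) 0

-- ===== PORT B =====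
def distinguish_words_alt (str : String) : Bool :=
  let flags := (PySem.Str.split₀ str).map PySem.Str.strIsdigit
  (flags.zip ((PySem.List.slice flags (some 1) none).zip
              (PySem.List.slice flags (some 2) none))).any
    (fun abc => !(abc.1 || abc.2.1 || abc.2.2))

-- ===== PRECONDITION & SPEC =====
def Spec_distinguish_words (str : String) (out : Bool) : Prop := out = distinguish_words_alt str
instance (str : String) (out : Bool) : Decidable (Spec_distinguish_words str out) := by unfold Spec_distinguish_words; infer_instance

-- ===== CLAIM (what is proved, stated in full; the proofs are below) =====
def Claim_equal_distinguish_words : Prop := ∀ (str : String), Dom_distinguish_words str → Spec_distinguish_words str (distinguish_words str)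

-- ===== LEMMAS AND PROOFS =====

-- A's loop over the flag list (isdigit precomputed)
def pvLoopF : List Bool → Nat → Bool
  | [], _ => false
  | f :: rest, i =>
    let i2 := if f then 0 else i + 1
    if 3 ≤ i2 then true else pvLoopF rest i2

-- length of the leading run of `false` flags
def pvPref : List Bool → Nat
  | false :: t => pvPref t + 1
  | _ => 0

-- B's window scan on a flag list
def pvZ (fs : List Bool) : Bool :=
  (fs.zip ((fs.drop 1).zip (fs.drop 2))).any (fun abc => !(abc.1 || abc.2.1 || abc.2.2))

theorem pvALoop_eq_loopF (ws : List String) (i : Nat) :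
    pvALoop ws i = pvLoopF (ws.map PySem.Str.strIsdigit) i := by
  induction ws generalizing i with
  | nil => rfl
  | cons s rest ih =>
    simp only [pvALoop, pvLoopF, List.map]
    cases h : PySem.Str.strIsdigit s <;> simp [ih]

theorem pvZ_true_cons (t : List Bool) : pvZ (true :: t) = pvZ t := by
  match t with
  | [] => rfl
  | [b] => simp [pvZ]
  | b :: c :: t' => simp [pvZ]

theorem pvZ_false_cons (t : List Bool) :
    pvZ (false :: t) = (decide (2 ≤ pvPref t) || pvZ t) := by
  match t with
  | [] => simp [pvZ, pvPref]
  | [true] => simp [pvZ, pvPref]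
  | [false] => simp [pvZ, pvPref]
  | true :: c :: t' => simp [pvZ, pvPref]
  | false :: true :: t' => simp [pvZ, pvPref]
  | false :: false :: t' => simp [pvZ, pvPref]

theorem pvZ_of_pref (fs : List Bool) (h : 3 ≤ pvPref fs) : pvZ fs = true := by
  match fs with
  | [] => simp [pvPref] at h
  | true :: _ => simp [pvPref] at h
  | [false] => simp [pvPref] at h
  | false :: true :: _ => simp [pvPref] at h
  | [false, false] => simp [pvPref] at h
  | false :: false :: true :: _ => simp [pvPref] at h
  | false :: false :: false :: t => simp [pvZ]

theorem pvLoopF_eq (fs : List Bool) (i : Nat) (hi : i ≤ 2) :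
    pvLoopF fs i = (decide (3 ≤ i + pvPref fs) || pvZ fs) := by
  induction fs generalizing i with
  | nil =>
    simp [pvLoopF, pvPref, pvZ]
    omega
  | cons f t ih =>
    cases f with
    | true =>
      have h0 : pvLoopF (true :: t) i = pvLoopF t 0 := by simp [pvLoopF]
      have hp : pvPref (true :: t) = 0 := rfl
      rw [h0, ih 0 (by omega), pvZ_true_cons, hp]
      have h3 : ¬ (3 ≤ i + 0) := by omega
      by_cases hz : 3 ≤ pvPref t
      · simp [pvZ_of_pref t hz, hz]
      · simp [hz]
        intro h; exact absurd h (by omega)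
    | false =>
      have hp : pvPref (false :: t) = pvPref t + 1 := rfl
      by_cases h2 : i = 2
      · subst h2
        have h3 : 3 ≤ 2 + pvPref (false :: t) := by omega
        simp [pvLoopF, h3]
      · have hi1 : i + 1 ≤ 2 := by omega
        have h0 : pvLoopF (false :: t) i = pvLoopF t (i + 1) := by
          simp [pvLoopF]; omega
        rw [h0, ih (i + 1) hi1, pvZ_false_cons, hp]
        by_cases hd : 3 ≤ i + 1 + pvPref t
        · have : 3 ≤ i + (pvPref t + 1) := by omega
          simp [hd, this]
        · have hnd : ¬ 3 ≤ i + (pvPref t + 1) := by omega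
          have h2p : ¬ 2 ≤ pvPref t := by omega
          simp [hd, hnd, h2p]

theorem pvLoopF_zero (fs : List Bool) : pvLoopF fs 0 = pvZ fs := by
  rw [pvLoopF_eq fs 0 (by omega)]
  by_cases h : 3 ≤ pvPref fs
  · simp [pvZ_of_pref fs h, h]
  · simp [h]

-- ===== VERDICT (by name: the statement is the Claim_ definition above) =====
theorem distinguish_words_spec : Claim_equal_distinguish_words := by
  intro str _
  show distinguish_words str = distinguish_words_alt str
  unfold distinguish_words distinguish_words_alt
  rw [pvALoop_eq_loopF, pvLoopF_zero, pvZ]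
  simp only [PySem.List.slice_from_one,
      PySem.List.slice_from _ (show (0:Int) ≤ 2 by norm_num), List.drop_one]
  rfl
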